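-- pv_equiv track=rewrite | github.com/haoside666/DockerfileGen | graphparse/dockerfile_gen/Demand_solvers/solve_interface.py | process_tool_pkg_block
-- ===== SOURCE A (Python) =====
-- def process_tool_pkg_block(dockerfile_lines):
--     processed_lines = []
--     combined_command = []
--
--     for line in dockerfile_lines:
--         line = line.strip()
--         if line.startswith('RUN'):
--             command = line[4:].strip()
--             combined_command.append(command)
--         else:
--             if combined_command:
--                 processed_lines.append('RUN ' + ' && \\\n    '.join(combined_command))
--                 combined_command = []
--             processed_lines.append(line)
--
--     if combined_command:
--         processed_lines.append('RUN ' + ' && \\\n    '.join(combined_command))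
--
--     return processed_lines
-- ===== SOURCE B (Python) =====
-- def process_tool_pkg_block(dockerfile_lines):
--     lines = [l.strip() for l in dockerfile_lines]
--     out = []
--     i = 0
--     n = len(lines)
--     while i < n:
--         if lines[i].startswith('RUN'):
--             j = i
--             while j < n and lines[j].startswith('RUN'):
--                 j += 1
--             out.append('RUN ' + ' && \\\n    '.join(l[4:].strip() for l in lines[i:j]))
--             i = j
--         else:
--             out.append(lines[i])
--             i += 1
--     return out
-- ===== Notes on version B (the rewrite author's own statement) =====
-- stated objective: alternative
-- what changed: Replaces A's accumulate-and-flush state machine (pending combined_command list, flushed on non-RUN lines and at the end) with a strip-first then group-consecutive-RUN-lines-and-emit decomposition.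
import Mathlib
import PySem

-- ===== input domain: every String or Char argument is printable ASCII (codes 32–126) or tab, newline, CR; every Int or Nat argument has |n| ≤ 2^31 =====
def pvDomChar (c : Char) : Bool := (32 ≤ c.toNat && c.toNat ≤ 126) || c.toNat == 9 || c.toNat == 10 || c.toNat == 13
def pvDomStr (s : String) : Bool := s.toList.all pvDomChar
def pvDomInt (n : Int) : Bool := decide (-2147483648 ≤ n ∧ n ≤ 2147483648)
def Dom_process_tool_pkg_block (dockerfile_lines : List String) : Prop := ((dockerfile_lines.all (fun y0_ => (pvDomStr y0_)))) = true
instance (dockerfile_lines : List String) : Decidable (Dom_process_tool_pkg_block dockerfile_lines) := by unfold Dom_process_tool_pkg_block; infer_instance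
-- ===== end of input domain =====

-- B replaces A's accumulate-and-flush state machine by a strip-first, group-consecutive-RUN-lines-then-emit decomposition (objective: alternative/idiomatic; same cost).

-- ===== PORT A =====
def pvSep : String := " && \\\n    "

-- A's loop state: (processed_lines, combined_command)
def pvALoop : List String → List String × List String → List String × List String
  | [], st => st
  | line :: rest, (proc, comb) =>
    let l := PySem.Str.strip line
    if PySem.Str.startswith l "RUN" then
      pvALoop rest (proc, comb ++ [PySem.Str.strip (PySem.Str.slice l (some 4) none)])
    else if comb ≠ [] then
      pvALoop rest (proc ++ ["RUN " ++ PySem.Str.join pvSep comb] ++ [l], [])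
    else
      pvALoop rest (proc ++ [l], [])

def process_tool_pkg_block (dockerfile_lines : List String) : List String :=
  let st := pvALoop dockerfile_lines ([], [])
  if st.2 ≠ [] then st.1 ++ ["RUN " ++ PySem.Str.join pvSep st.2] else st.1

-- ===== PORT B =====
def pvIsRun (l : String) : Bool := PySem.Str.startswith l "RUN"
def pvCmd (l : String) : String := PySem.Str.strip (PySem.Str.slice l (some 4) none)

-- B's grouping loop over the pre-stripped lines: a maximal run of RUN lines is
-- emitted as one joined command, any other line is emitted as is.
def pvAltGo : List String → List String
  | [] => []
  | l :: rest =>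
    if pvIsRun l then
      ("RUN " ++ PySem.Str.join pvSep (((l :: rest).takeWhile pvIsRun).map pvCmd))
        :: pvAltGo ((l :: rest).dropWhile pvIsRun)
    else l :: pvAltGo rest
termination_by ls => ls.length
decreasing_by
  · simp only [List.dropWhile_cons, *, if_pos]
    exact Nat.lt_succ_of_le (List.length_dropWhile_le _ _)
  · simp

def process_tool_pkg_block_alt (dockerfile_lines : List String) : List String :=
  pvAltGo (dockerfile_lines.map PySem.Str.strip)

-- ===== PRECONDITION & SPEC =====
def Spec_process_tool_pkg_block (dockerfile_lines : List String) (out : List String) : Prop := out = process_tool_pkg_block_alt dockerfile_lines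
instance (dockerfile_lines : List String) (out : List String) : Decidable (Spec_process_tool_pkg_block dockerfile_lines out) := by unfold Spec_process_tool_pkg_block; infer_instance

-- ===== CLAIM (what is proved, stated in full; the proofs are below) =====
def Claim_equal_process_tool_pkg_block : Prop := ∀ (dockerfile_lines : List String), Dom_process_tool_pkg_block dockerfile_lines → Spec_process_tool_pkg_block dockerfile_lines (process_tool_pkg_block dockerfile_lines)

-- ===== LEMMAS AND PROOFS =====

-- Bridge: the emission of A's remaining output given a pending combined_command
-- and the (already stripped) remaining lines.
def pvE : List String → List String → List String
  | comb, [] => if comb ≠ [] then ["RUN " ++ PySem.Str.join pvSep comb] else []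
  | comb, l :: rest =>
    if pvIsRun l then pvE (comb ++ [pvCmd l]) rest
    else (if comb ≠ [] then ["RUN " ++ PySem.Str.join pvSep comb] else []) ++ l :: pvE [] rest

theorem pvALoop_eq_E : ∀ (lines proc comb : List String),
    (let st := pvALoop lines (proc, comb);
     if st.2 ≠ [] then st.1 ++ ["RUN " ++ PySem.Str.join pvSep st.2] else st.1)
      = proc ++ pvE comb (lines.map PySem.Str.strip) := by
  intro lines
  induction lines with
  | nil => intro proc comb; simp [pvALoop, pvE]; split <;> simp
  | cons line rest ih =>
    intro proc comb
    simp only [pvALoop, List.map_cons, pvE, pvIsRun, pvCmd]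
    split
    · exact ih proc (comb ++ [PySem.Str.strip (PySem.Str.slice (PySem.Str.strip line) (some 4) none)])
    · split
      · rw [ih]; simp
      · rw [ih]; simp_all

theorem pvE_run : ∀ (ls comb : List String), comb ≠ [] →
    pvE comb ls = ("RUN " ++ PySem.Str.join pvSep (comb ++ (ls.takeWhile pvIsRun).map pvCmd))
      :: pvE [] (ls.dropWhile pvIsRun) := by
  intro ls
  induction ls with
  | nil => intro comb h; simp [pvE, h]
  | cons l rest ih =>
    intro comb h
    by_cases hr : pvIsRun l = true
    · simp only [pvE, hr, if_pos, List.takeWhile_cons, List.dropWhile_cons]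
      rw [ih (comb ++ [pvCmd l]) (by simp)]
      simp
    · simp [pvE, hr, h]

theorem pvE_eq_altGo : ∀ (n : Nat) (ls : List String), ls.length ≤ n → pvE [] ls = pvAltGo ls := by
  intro n
  induction n with
  | zero => intro ls h; rw [List.length_eq_zero_iff.mp (Nat.le_zero.mp h)]; simp [pvE, pvAltGo]
  | succ n ih =>
    intro ls h
    match ls with
    | [] => simp [pvE, pvAltGo]
    | l :: rest =>
      by_cases hr : pvIsRun l = true
      · rw [pvAltGo]
        simp only [hr, if_pos, pvE, List.nil_append]
        rw [pvE_run rest [pvCmd l] (by simp)]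
        simp only [List.takeWhile_cons, List.dropWhile_cons, hr, if_pos, List.map_cons,
          List.singleton_append]
        rw [ih (rest.dropWhile pvIsRun)
          (le_trans (List.length_dropWhile_le _ _) (by simpa using h))]
      · rw [pvAltGo]
        simp only [hr, pvE, Bool.false_eq_true, if_false, List.nil_append,
          ne_eq, not_true_eq_false]
        rw [ih rest (by simpa using h)]

-- ===== VERDICT (by name: the statement is the Claim_ definition above) =====
theorem process_tool_pkg_block_spec : Claim_equal_process_tool_pkg_block := by
  intro ls _
  show process_tool_pkg_block ls = process_tool_pkg_block_alt ls
  rw [process_tool_pkg_block, pvALoop_eq_E ls [] [], List.nil_append,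
    pvE_eq_altGo (ls.map PySem.Str.strip).length _ le_rfl]
  rfl
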